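-- pv_equiv track=rewrite | github.com/GouravYadavv/Python | Recursion/Linear_Search_without_passing_the_list_in_parameter.py | Search
-- ===== SOURCE A (Python) =====
-- from typing import List
--
-- def Search(arr, target, index):
--     New_List = []
--     if index == len(arr) - 1:
--         return New_List
--     if arr[index] == target:
--         New_List.append(index)
--     Answer: List = Search(arr, target, index + 1)
--     New_List.extend(Answer)
--     return New_List
-- ===== SOURCE B (Python) =====
-- def Search(arr, target, index):
--     return [i for i in range(index, len(arr) - 1) if arr[i] == target]
-- ===== Notes on version B (the rewrite author's own statement) =====
-- stated objective: idiomatic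
-- what changed: Replaces the forward recursion that builds the result by list extension with a single list comprehension over range(index, len(arr)-1) filtering indices whose element equals the target.
import Mathlib
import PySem

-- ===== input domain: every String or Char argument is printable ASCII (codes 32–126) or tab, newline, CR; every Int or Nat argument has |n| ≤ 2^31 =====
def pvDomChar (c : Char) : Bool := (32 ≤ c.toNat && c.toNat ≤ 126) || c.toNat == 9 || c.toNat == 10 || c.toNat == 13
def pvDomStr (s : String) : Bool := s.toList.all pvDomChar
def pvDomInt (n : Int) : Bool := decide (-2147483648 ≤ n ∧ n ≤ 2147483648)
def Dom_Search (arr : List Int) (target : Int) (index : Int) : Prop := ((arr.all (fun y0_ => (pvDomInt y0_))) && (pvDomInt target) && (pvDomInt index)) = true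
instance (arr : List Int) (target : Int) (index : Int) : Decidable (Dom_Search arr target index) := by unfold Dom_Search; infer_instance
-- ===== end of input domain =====

-- B replaces A's forward recursion (result built by extend) with a single list
-- comprehension filtering range(index, len(arr)-1); objective: idiomatic.

-- ===== PORT A =====
-- Literal port of A's recursion: stop when index == len(arr)-1, otherwise read
-- arr[index] (pyGet? none = IndexError, excluded by Pre_), prepend index on a
-- match and recurse on index+1.
def Search (arr : List Int) (target : Int) (index : Int) : List Int :=
  if index = (arr.length : Int) - 1 then []
  else
    match h : PySem.List.pyGet? arr index with
    | none => []   -- Python raises IndexError here (outside Pre_Search)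
    | some v =>
      (if v = target then [index] else []) ++ Search arr target (index + 1)
  termination_by ((arr.length : Int) - index).toNat
  decreasing_by
    have := (PySem.List.pyGet?_eq_none_iff (xs := arr) (i := index)).not_left
    simp [h, PySem.Raise.InRange] at this
    omega

-- ===== PORT B =====
-- Literal port of B's comprehension: filter range(index, len(arr)-1) by arr[i] == target.
def Search_alt (arr : List Int) (target : Int) (index : Int) : List Int :=
  (PySem.List.pyRange index ((arr.length : Int) - 1) 1).filter
    (fun i => PySem.List.pyGet? arr i == some target)

-- ===== PRECONDITION & SPEC =====
-- Pre_: exactly the inputs on which Python A returns (no IndexError): either the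
-- starting index is already len(arr)-1, or every access arr[index..len-2] is in range.
def Pre_Search (arr : List Int) (target : Int) (index : Int) : Prop :=
  index = (arr.length : Int) - 1 ∨ (-(arr.length : Int) ≤ index ∧ index < (arr.length : Int) - 1)
instance (arr : List Int) (target : Int) (index : Int) : Decidable (Pre_Search arr target index) := by unfold Pre_Search; infer_instance

def pvWitness_Search : List Int × Int × Int := ([3, 1, 3, 2], 3, 0)

def Spec_Search (arr : List Int) (target : Int) (index : Int) (out : List Int) : Prop := out = Search_alt arr target index
instance (arr : List Int) (target : Int) (index : Int) (out : List Int) : Decidable (Spec_Search arr target index out) := by unfold Spec_Search; infer_instance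

-- ===== CLAIM (what is proved, stated in full; the proofs are below) =====
def Claim_equal_Search : Prop := ∀ (arr : List Int) (target : Int) (index : Int), Dom_Search arr target index → Pre_Search arr target index → Spec_Search arr target index (Search arr target index)

-- ===== LEMMAS AND PROOFS =====

-- On every in-range starting index, A's recursion computes the filtered range.
theorem search_eq_filter (arr : List Int) (target : Int) (index : Int)
    (h1 : -(arr.length : Int) ≤ index) (h2 : index ≤ (arr.length : Int) - 1) :
    Search arr target index
      = (PySem.List.pyRange index ((arr.length : Int) - 1) 1).filter
          (fun i => PySem.List.pyGet? arr i == some target) := by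
  generalize hk : ((arr.length : Int) - 1 - index).toNat = k
  induction k generalizing index with
  | zero =>
      have hi : index = (arr.length : Int) - 1 := by omega
      rw [Search, if_pos hi, PySem.List.pyRange_one_eq_nil (by omega)]
      simp
  | succ k ih =>
      have hne : index ≠ (arr.length : Int) - 1 := by omega
      have hin : ¬ PySem.List.pyGet? arr index = none := by
        have := (PySem.List.pyGet?_eq_none_iff (xs := arr) (i := index)).not_left
        simp [PySem.Raise.InRange] at this
        exact this.mpr ⟨by omega, by omega⟩
      rw [Search, if_neg hne]
      rw [PySem.List.pyRange_one_cons (by omega), List.filter_cons]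
      cases h : PySem.List.pyGet? arr index with
      | none => exact absurd h hin
      | some v =>
          rw [ih (index + 1) (by omega) (by omega) (by omega)]
          by_cases hv : v = target <;> simp [hv]

-- ===== VERDICT (by name: the statement is the Claim_ definition above) =====
theorem Search_spec : Claim_equal_Search := by
  intro arr target index _ hpre
  unfold Spec_Search Search_alt
  rcases hpre with h | ⟨h1, h2⟩
  · rw [Search, if_pos h, PySem.List.pyRange_one_eq_nil (by omega)]
    simp
  · exact search_eq_filter arr target index h1 (by omega)
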